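-- pv_equiv track=rewrite | github.com/naturallanguagepuzzling/blog | 2020-12-20-Christmas_wishes.py | filter_buenos_aires_pairs
-- ===== SOURCE A (Python) =====
-- def filter_buenos_aires_pairs(some_pairs):
--     ba_pairs = []
--     my_chars = ["b", "u", "e", "n", "o", "s", "a", "i", "r", "e", "s"]
--     for sp in some_pairs:
--         keep = "yes"
--         spp = sp[0]+sp[1]
--         current_chars = list(my_chars)
--         spp_chars = list(spp)
--         for sppc in spp_chars:
--             if sppc not in current_chars:
--                 keep = "no"
--                 break
--             else:
--                 current_chars.remove(sppc)
--         if keep == "yes":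
--             ba_pairs.append(sp)
--     return(ba_pairs)
-- ===== SOURCE B (Python) =====
-- BUDGET = "buenosaires"
--
-- def filter_buenos_aires_pairs(some_pairs):
--     kept = []
--     for sp in some_pairs:
--         spp = sp[0] + sp[1]
--         if all(spp.count(c) <= BUDGET.count(c) for c in set(spp)):
--             kept.append(sp)
--     return kept
-- ===== Notes on version B (the rewrite author's own statement) =====
-- stated objective: idiomatic
-- what changed: The copy-the-budget list with an inner consume-loop (membership test + remove + early break per character) is replaced by a per-pair multiset-containment check: for each distinct character of the concatenation, compare its count with its count in 'buenosaires'.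
import Mathlib
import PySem

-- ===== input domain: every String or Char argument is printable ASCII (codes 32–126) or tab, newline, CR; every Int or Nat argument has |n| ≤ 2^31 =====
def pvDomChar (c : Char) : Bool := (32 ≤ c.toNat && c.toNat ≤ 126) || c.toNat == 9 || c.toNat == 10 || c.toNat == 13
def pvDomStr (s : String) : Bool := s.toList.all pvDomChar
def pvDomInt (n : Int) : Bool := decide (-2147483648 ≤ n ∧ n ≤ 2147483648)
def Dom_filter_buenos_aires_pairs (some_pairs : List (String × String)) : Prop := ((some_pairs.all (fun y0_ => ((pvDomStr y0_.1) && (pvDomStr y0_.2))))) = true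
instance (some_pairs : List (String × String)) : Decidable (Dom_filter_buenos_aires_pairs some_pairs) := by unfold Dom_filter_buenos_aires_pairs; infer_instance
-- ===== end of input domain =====

-- B replaces A's copy-the-budget list and inner consume-with-remove/early-break loop by a
-- per-pair multiset-containment check (count of each distinct character vs its count in
-- "buenosaires"); objective: idiomatic, same asymptotic cost.

-- ===== PORT A =====
-- inner loop over spp_chars: keep="no"+break ↦ returning false; 'current_chars.remove(sppc)'
-- removes the first occurrence ↦ List.erase
def pvConsume : List Char → List Char → Bool
  | [], _ => true
  | c :: cs, cur => if c ∈ cur then pvConsume cs (cur.erase c) else false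

def filter_buenos_aires_pairs (some_pairs : List (String × String)) : List (String × String) :=
  some_pairs.foldl (fun ba_pairs sp =>
    -- spp = sp[0]+sp[1]; spp_chars = list(spp)  (ported on the char-list side)
    let spp_chars := sp.1.toList ++ sp.2.toList
    let my_chars := ['b', 'u', 'e', 'n', 'o', 's', 'a', 'i', 'r', 'e', 's']
    if pvConsume spp_chars my_chars then ba_pairs ++ [sp] else ba_pairs) []

-- ===== PORT B =====
-- BUDGET = "buenosaires"
def pvBudget : List Char := ['b', 'u', 'e', 'n', 'o', 's', 'a', 'i', 'r', 'e', 's']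

def filter_buenos_aires_pairs_alt (some_pairs : List (String × String)) : List (String × String) :=
  some_pairs.foldl (fun kept sp =>
    let spp := sp.1.toList ++ sp.2.toList
    -- all(spp.count(c) <= BUDGET.count(c) for c in set(spp)): order-independent fold over the set
    if (PySem.Set.ofList spp).all (fun c => decide (spp.count c ≤ pvBudget.count c))
    then kept ++ [sp] else kept) []

-- ===== PRECONDITION & SPEC =====
def Spec_filter_buenos_aires_pairs (some_pairs : List (String × String)) (out : List (String × String)) : Prop := out = filter_buenos_aires_pairs_alt some_pairs
instance (some_pairs : List (String × String)) (out : List (String × String)) : Decidable (Spec_filter_buenos_aires_pairs some_pairs out) := by unfold Spec_filter_buenos_aires_pairs; infer_instance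

-- ===== CLAIM (what is proved, stated in full; the proofs are below) =====
def Claim_equal_filter_buenos_aires_pairs : Prop := ∀ (some_pairs : List (String × String)), Dom_filter_buenos_aires_pairs some_pairs → Spec_filter_buenos_aires_pairs some_pairs (filter_buenos_aires_pairs some_pairs)

-- ===== LEMMAS AND PROOFS =====

-- A's consume loop succeeds exactly when the char list is a submultiset of the budget
theorem pvConsume_iff_count (l cur : List Char) :
    pvConsume l cur = true ↔ ∀ c : Char, l.count c ≤ cur.count c := by
  induction l generalizing cur with
  | nil => simp [pvConsume]
  | cons c cs ih =>
    simp only [pvConsume]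
    by_cases h : c ∈ cur
    · simp only [h, if_true, ih]
      have hc1 : 1 ≤ cur.count c := List.one_le_count_iff.mpr h
      constructor
      · intro H d
        have hd := H d
        rcases eq_or_ne d c with rfl | hne
        · rw [List.count_erase_self] at hd
          rw [List.count_cons_self]
          omega
        · rw [List.count_erase_of_ne hne] at hd
          simp only [List.count_cons, beq_iff_eq, hne.symm, if_false]
          omega
      · intro H d
        have hd := H d
        rcases eq_or_ne d c with rfl | hne
        · rw [List.count_cons_self] at hd
          rw [List.count_erase_self]
          omega
        · simp only [List.count_cons, beq_iff_eq, hne.symm, if_false] at hd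
          rw [List.count_erase_of_ne hne]
          omega
    · simp only [h, if_false, Bool.false_eq_true, false_iff]
      intro H
      have hc := H c
      rw [List.count_cons_self, List.count_eq_zero_of_not_mem h] at hc
      omega

-- B's check over the distinct characters equals the full submultiset condition
theorem alt_check_iff (spp : List Char) :
    ((PySem.Set.ofList spp).all (fun c => decide (spp.count c ≤ pvBudget.count c)) = true)
      ↔ ∀ c : Char, spp.count c ≤ pvBudget.count c := by
  simp only [List.all_eq_true, decide_eq_true_eq]
  constructor
  · intro H c
    by_cases hc : c ∈ spp
    · exact H c (by simpa [PySem.Set.mem_ofList] using hc)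
    · simp [List.count_eq_zero_of_not_mem hc]
  · intro H c _
    exact H c

-- the two per-pair tests agree (as Bools)
theorem pred_eq (spp : List Char) :
    pvConsume spp ['b', 'u', 'e', 'n', 'o', 's', 'a', 'i', 'r', 'e', 's']
      = (PySem.Set.ofList spp).all (fun c => decide (spp.count c ≤ pvBudget.count c)) := by
  show pvConsume spp pvBudget = _
  have h := (pvConsume_iff_count spp pvBudget).trans (alt_check_iff spp).symm
  rcases Bool.eq_false_or_eq_true (pvConsume spp pvBudget) with ht | hf
  · rw [ht, h.mp ht]
  · rcases Bool.eq_false_or_eq_true ((PySem.Set.ofList spp).all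
        (fun c => decide (spp.count c ≤ pvBudget.count c))) with ht2 | hf2
    · rw [h.mpr ht2] at hf
      exact absurd hf (by simp)
    · rw [hf, hf2]

-- ===== VERDICT (by name: the statement is the Claim_ definition above) =====
theorem filter_buenos_aires_pairs_spec : Claim_equal_filter_buenos_aires_pairs := by
  intro ps _
  unfold Spec_filter_buenos_aires_pairs filter_buenos_aires_pairs filter_buenos_aires_pairs_alt
  simp only [pred_eq]
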